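-- pv_equiv track=rewrite | github.com/DanielLepeVega/TecProjects | Programacion/Actividades/EjClase.py | divideenTam
-- ===== SOURCE A (Python) =====
-- def divideenTam(cadena,n):
--     nueva=''
--     for pos in range(len(cadena)):
--         if pos==(n-1):
--             nueva=nueva+cadena[pos]+'-'
--         else:
--             nueva+=cadena[pos]
--     return nueva
-- ===== SOURCE B (Python) =====
-- def divideenTam(cadena, n):
--     if 1 <= n <= len(cadena):
--         return cadena[:n] + '-' + cadena[n:]
--     return cadena
-- ===== Notes on version B (the rewrite author's own statement) =====
-- stated objective: idiomatic
-- what changed: Replaces the character-by-character accumulation loop with a single guarded slice concatenation cadena[:n] + '-' + cadena[n:] when 1 <= n <= len(cadena), returning cadena unchanged otherwise.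
import Mathlib
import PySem

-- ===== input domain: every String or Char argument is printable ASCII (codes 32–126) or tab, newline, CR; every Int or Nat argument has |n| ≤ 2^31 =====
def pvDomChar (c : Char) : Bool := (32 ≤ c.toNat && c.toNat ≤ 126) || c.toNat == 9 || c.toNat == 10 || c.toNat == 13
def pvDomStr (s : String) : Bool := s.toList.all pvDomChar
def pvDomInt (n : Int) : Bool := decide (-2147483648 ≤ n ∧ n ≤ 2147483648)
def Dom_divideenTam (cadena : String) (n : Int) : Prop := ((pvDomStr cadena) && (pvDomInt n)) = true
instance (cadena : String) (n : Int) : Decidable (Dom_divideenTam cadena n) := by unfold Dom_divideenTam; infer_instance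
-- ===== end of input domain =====

-- B replaces A's character-by-character accumulation loop with one guarded slice concatenation (idiomatic).

-- ===== PORT A =====
-- literal port: build nueva char by char over range(len(cadena)), adding '-' right after position n-1
def divideenTam (cadena : String) (n : Int) : String :=
  let cs := cadena.toList
  let nueva :=
    (PySem.List.pyRange 0 (cs.length : Int) 1).foldl
      (fun nueva pos =>
        if pos == n - 1 then nueva ++ [PySem.List.pyGetD cs pos ' ', '-']
        else nueva ++ [PySem.List.pyGetD cs pos ' ']) []
  String.ofList nueva

-- ===== PORT B =====
-- literal port of Source B: guarded slicing, cadena[:n] + '-' + cadena[n:]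
def divideenTam_alt (cadena : String) (n : Int) : String :=
  let cs := cadena.toList
  if 1 ≤ n ∧ n ≤ (cs.length : Int) then
    String.ofList (PySem.List.slice cs none (some n) ++ '-' :: PySem.List.slice cs (some n) none)
  else cadena

-- ===== PRECONDITION & SPEC =====
def Spec_divideenTam (cadena : String) (n : Int) (out : String) : Prop := out = divideenTam_alt cadena n
instance (cadena : String) (n : Int) (out : String) : Decidable (Spec_divideenTam cadena n out) := by unfold Spec_divideenTam; infer_instance

-- ===== CLAIM (what is proved, stated in full; the proofs are below) =====
def Claim_equal_divideenTam : Prop := ∀ (cadena : String) (n : Int), Dom_divideenTam cadena n → Spec_divideenTam cadena n (divideenTam cadena n)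

-- ===== LEMMAS AND PROOFS =====

-- A's loop over any character list computes B's guarded-slice value (stated with take/drop).
theorem divideenTam_loop (n : Int) (cs : List Char) (acc : List Char) :
    (PySem.List.pyRange 0 (cs.length : Int) 1).foldl
      (fun nueva pos =>
        if pos == n - 1 then nueva ++ [PySem.List.pyGetD cs pos ' ', '-']
        else nueva ++ [PySem.List.pyGetD cs pos ' ']) acc
    = acc ++ (if 1 ≤ n ∧ n ≤ (cs.length : Int) then
        cs.take n.toNat ++ '-' :: cs.drop n.toNat else cs) := by
  induction cs using List.reverseRecOn generalizing acc with
  | nil =>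
      have hr : PySem.List.pyRange 0 ((([] : List Char).length : Int)) 1 = [] := by
        simp [PySem.List.pyRange_one_eq_nil]
      rw [hr, List.foldl_nil, if_neg (by simp; omega)]
      exact (List.append_nil acc).symm
  | append_singleton cs c ih =>
      have hlen : ((cs ++ [c]).length : Int) = (cs.length : Int) + 1 := by
        simp
      rw [hlen, PySem.List.pyRange_one_succ_right (by positivity), List.foldl_append]
      -- the first cs.length steps only touch indices inside cs
      have hcongr :
          (PySem.List.pyRange 0 (cs.length : Int) 1).foldl
            (fun nueva pos =>
              if pos == n - 1 then nueva ++ [PySem.List.pyGetD (cs ++ [c]) pos ' ', '-']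
              else nueva ++ [PySem.List.pyGetD (cs ++ [c]) pos ' ']) acc
          = (PySem.List.pyRange 0 (cs.length : Int) 1).foldl
            (fun nueva pos =>
              if pos == n - 1 then nueva ++ [PySem.List.pyGetD cs pos ' ', '-']
              else nueva ++ [PySem.List.pyGetD cs pos ' ']) acc := by
        apply PySem.List.foldl_congr_mem
        intro b pos hpos
        have hb := (PySem.List.mem_pyRange_one).1 hpos
        have hget : PySem.List.pyGetD (cs ++ [c]) pos ' ' = PySem.List.pyGetD cs pos ' ' := by
          rw [PySem.List.pyGetD_eq_getElem _ ' ' hb.1 (by simp; omega),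
              PySem.List.pyGetD_eq_getElem _ ' ' hb.1 (by omega)]
          rw [List.getElem_append_left (by omega)]
        rw [hget]
      rw [hcongr, ih]
      -- last step: index cs.length hits c
      have hc : PySem.List.pyGetD (cs ++ [c]) (cs.length : Int) ' ' = c := by
        rw [PySem.List.pyGetD_eq_getElem _ ' ' (by positivity) (by simp)]
        simp
      simp only [List.foldl_cons, List.foldl_nil, hc, beq_iff_eq]
      by_cases h1 : (cs.length : Int) = n - 1
      · -- n = cs.length + 1 : dash goes after the last character
        have hn : n = (cs.length : Int) + 1 := by omega
        have hfalse : ¬ (1 ≤ n ∧ n ≤ (cs.length : Int)) := by omega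
        have htrue : 1 ≤ n ∧ n ≤ (cs.length : Int) + 1 := by omega
        have ht : (cs ++ [c]).take n.toNat = cs ++ [c] := by
          apply List.take_of_length_le; simp; omega
        have hd : (cs ++ [c]).drop n.toNat = [] := by
          apply List.drop_eq_nil_of_le; simp; omega
        rw [if_pos h1, if_neg hfalse, if_pos htrue, ht, hd]; simp
      · rw [if_neg h1]
        by_cases h2 : 1 ≤ n ∧ n ≤ (cs.length : Int)
        · have h2' : 1 ≤ n ∧ n ≤ (cs.length : Int) + 1 := by omega
          have ht : (cs ++ [c]).take n.toNat = cs.take n.toNat := by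
            rw [List.take_append_of_le_length (by omega)]
          have hd : (cs ++ [c]).drop n.toNat = cs.drop n.toNat ++ [c] := by
            rw [List.drop_append_of_le_length (by omega)]
          rw [if_pos h2, if_pos h2', ht, hd]; simp
        · have h2' : ¬ (1 ≤ n ∧ n ≤ (cs.length : Int) + 1) := by omega
          rw [if_neg h2, if_neg h2']; simp

-- ===== VERDICT (by name: the statement is the Claim_ definition above) =====
theorem divideenTam_spec : Claim_equal_divideenTam := by
  intro cadena n _
  unfold Spec_divideenTam divideenTam divideenTam_alt
  simp only [divideenTam_loop, List.nil_append]
  by_cases h : 1 ≤ n ∧ n ≤ (cadena.toList.length : Int)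
  · obtain ⟨h1, h2⟩ := h
    have hn : n = ((n.toNat : Nat) : Int) := by omega
    have hsl1 : PySem.List.slice cadena.toList none (some n) = cadena.toList.take n.toNat := by
      conv_lhs => rw [hn, PySem.List.slice_to_natCast]
    have hsl2 : PySem.List.slice cadena.toList (some n) none = cadena.toList.drop n.toNat := by
      conv_lhs => rw [hn, PySem.List.slice_from_natCast]
    rw [if_pos ⟨h1, h2⟩, if_pos ⟨h1, h2⟩, hsl1, hsl2]
  · rw [if_neg h, if_neg h]
    simp
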